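-- pv_equiv track=rewrite | github.com/AmanJ24/Hiroshi | Py/Other Files/for loop.py | arr_adder
-- ===== SOURCE A (Python) =====
-- def arr_adder(arr):
--     new = ""
--     for j in range(len(arr[0])):
--         for i in arr:
--             if i[j] != "":
--                 new += i[j]
--             else:
--                 break
--         new += " "
--     return new
-- ===== SOURCE B (Python) =====
-- def arr_adder(arr):
--     n = len(arr[0])
--     state = [(False, "")] * n
--     for row in arr:
--         state = [
--             ((True, acc) if stopped or row[j] == "" else (False, acc + row[j]))
--             for j, (stopped, acc) in enumerate(state)
--         ]
--     return "".join(acc + " " for _, acc in state)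
-- ===== Notes on version B (the rewrite author's own statement) =====
-- stated objective: alternative
-- what changed: Interchanges the loops: a single row-major pass updating a per-column (stopped, accumulated-text) state vector replaces A's column-major nested scan with an inner break and manual string accumulation.
import Mathlib
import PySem

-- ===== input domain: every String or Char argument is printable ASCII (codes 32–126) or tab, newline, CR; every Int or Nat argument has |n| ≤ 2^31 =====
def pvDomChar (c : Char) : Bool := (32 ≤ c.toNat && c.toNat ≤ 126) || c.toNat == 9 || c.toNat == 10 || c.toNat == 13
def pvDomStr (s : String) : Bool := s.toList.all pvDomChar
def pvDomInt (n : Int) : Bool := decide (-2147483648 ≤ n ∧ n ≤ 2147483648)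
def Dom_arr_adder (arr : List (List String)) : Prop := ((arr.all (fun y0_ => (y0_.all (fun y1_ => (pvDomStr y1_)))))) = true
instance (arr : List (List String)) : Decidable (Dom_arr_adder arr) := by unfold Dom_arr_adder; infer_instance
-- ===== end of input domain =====

-- B interchanges the loops: one row-major pass over a per-column (stopped, text) state
-- vector instead of A's column-major nested scan with break (objective: alternative; same cost).

-- ===== PORT A =====
-- inner 'for i in arr: if i[j] != "": new += i[j] else: break'; none = IndexError
def pvInnerA : List (List String) → Int → String → Option String
  | [], _, new => some new
  | i :: rest, j, new =>
    match PySem.List.pyGet? i j with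
    | none => none
    | some c => if c ≠ "" then pvInnerA rest j (new ++ c) else some new

-- outer 'for j in range(len(arr[0]))', appending " " after each column
def pvOuterA (arr : List (List String)) : List Nat → String → Option String
  | [], new => some new
  | j :: js, new =>
    match pvInnerA arr (j : Int) new with
    | none => none
    | some s => pvOuterA arr js (s ++ " ")

def arr_adder (arr : List (List String)) : String :=
  match PySem.List.pyGet? arr 0 with
  | none => ""   -- arr[0] raises IndexError; excluded by Pre_
  | some row0 => (pvOuterA arr (List.range row0.length) "").getD ""

-- ===== PORT B =====
-- one row of B's comprehension: '(True, acc) if stopped or row[j] == "" else (False, acc + row[j])'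
-- walked over enumerate(state); j is the current column index; none = IndexError on row[j]
def pvRowB (row : List String) : Int → List (Bool × String) → Option (List (Bool × String))
  | _, [] => some []
  | j, (stopped, acc) :: rest =>
    if stopped then (pvRowB row (j + 1) rest).map (fun st => (true, acc) :: st)
    else
      match PySem.List.pyGet? row j with
      | none => none
      | some c =>
        if c = "" then (pvRowB row (j + 1) rest).map (fun st => (true, acc) :: st)
        else (pvRowB row (j + 1) rest).map (fun st => (false, acc ++ c) :: st)

-- 'for row in arr: state = [...]'; j0 is the start index of enumerate (0 at the call site)
def pvRowsB (j0 : Int) : List (List String) → List (Bool × String) → Option (List (Bool × String))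
  | [], st => some st
  | row :: rows, st =>
    match pvRowB row j0 st with
    | none => none
    | some st' => pvRowsB j0 rows st'

-- '"".join(acc + " " for _, acc in state)'
def pvJoinB : List String → String
  | [] => ""
  | s :: ss => s ++ pvJoinB ss

def arr_adder_alt (arr : List (List String)) : String :=
  match PySem.List.pyGet? arr 0 with
  | none => ""   -- arr[0] raises IndexError; excluded by Pre_
  | some row0 =>
    ((pvRowsB 0 arr (List.replicate row0.length (false, ""))).map
      (fun st => pvJoinB (st.map (fun p => p.2 ++ " ")))).getD ""

-- ===== PRECONDITION & SPEC =====
-- Exactly the inputs on which the Python A returns normally: arr nonempty (arr[0]) and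
-- no access i[j] past a row's end before that column's break.
def Pre_arr_adder (arr : List (List String)) : Prop :=
  arr ≠ [] ∧ ∀ j, j < (arr.headD []).length →
    ∀ i, i < arr.length →
      (∀ k, k < i → j < (arr.getD k []).length ∧ (arr.getD k []).getD j "" ≠ "") →
      j < (arr.getD i []).length

instance (arr : List (List String)) : Decidable (Pre_arr_adder arr) := by
  unfold Pre_arr_adder; infer_instance

def pvWitness_arr_adder : List (List String) := [["a", "b"], ["c", ""]]

def Spec_arr_adder (arr : List (List String)) (out : String) : Prop := out = arr_adder_alt arr
instance (arr : List (List String)) (out : String) : Decidable (Spec_arr_adder arr out) := by unfold Spec_arr_adder; infer_instance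

-- ===== CLAIM (what is proved, stated in full; the proofs are below) =====
def Claim_equal_arr_adder : Prop := ∀ (arr : List (List String)), Dom_arr_adder arr → Pre_arr_adder arr → Spec_arr_adder arr (arr_adder arr)

-- ===== LEMMAS AND PROOFS =====

-- single-column evolution of one state cell through all rows
def pvColState : List (List String) → Int → Bool × String → Option (Bool × String)
  | [], _, s => some s
  | r :: rs, j, (stopped, acc) =>
    if stopped then pvColState rs j (true, acc)
    else
      match PySem.List.pyGet? r j with
      | none => none
      | some c =>
        if c = "" then pvColState rs j (true, acc) else pvColState rs j (false, acc ++ c)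

-- per-column results, columnwise
def pvColsOf (arr : List (List String)) : List Int → Option (List (Bool × String))
  | [] => some []
  | j :: js =>
    match pvColState arr j (false, ""), pvColsOf arr js with
    | some s, some ss => some (s :: ss)
    | _, _ => none

theorem pvColState_stopped (rows : List (List String)) (j : Int) (acc : String) :
    pvColState rows j (true, acc) = some (true, acc) := by
  induction rows with
  | nil => rfl
  | cons r rs ih => simpa [pvColState] using ih

-- loop interchange: the row-major fold decomposes columnwise
theorem pvRowsB_cons (rows : List (List String)) (s : Bool × String)
    (rest : List (Bool × String)) (j0 : Int) :
    pvRowsB j0 rows (s :: rest) =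
      (match pvColState rows j0 s, pvRowsB (j0 + 1) rows rest with
       | some a, some b => some (a :: b)
       | _, _ => none) := by
  induction rows generalizing s rest with
  | nil =>
    obtain ⟨stopped, acc⟩ := s
    simp [pvRowsB, pvColState]
  | cons r rs ih =>
    obtain ⟨stopped, acc⟩ := s
    by_cases hs : stopped
    · subst hs
      simp only [pvRowsB, pvRowB, pvColState]
      cases h : pvRowB r (j0 + 1) rest with
      | none => simp
      | some st1 => simp [ih]
    · simp only [Bool.not_eq_true] at hs; subst hs
      simp only [pvRowsB, pvRowB, Bool.false_eq_true, if_false, pvColState]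
      cases hg : PySem.List.pyGet? r j0 with
      | none => simp
      | some c =>
        by_cases hc : c = ""
        · subst hc
          cases h : pvRowB r (j0 + 1) rest with
          | none => simp
          | some st1 => simp [ih]
        · simp only [if_neg hc]
          cases h : pvRowB r (j0 + 1) rest with
          | none => simp
          | some st1 => simp [ih]

theorem pvRowsB_nil_state (rows : List (List String)) (j0 : Int) :
    pvRowsB j0 rows [] = some [] := by
  induction rows with
  | nil => rfl
  | cons r rs ih => simp [pvRowsB, pvRowB, ih]

theorem pvRowsB_replicate (arr : List (List String)) (n : Nat) (j0 : Int) :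
    pvRowsB j0 arr (List.replicate n (false, "")) =
      pvColsOf arr ((List.range n).map (fun (k : Nat) => j0 + (k : Int))) := by
  induction n generalizing j0 with
  | zero => simp [pvRowsB_nil_state, pvColsOf]
  | succ n ih =>
    have hmap : (List.range (n + 1)).map (fun (k : Nat) => j0 + (k : Int)) =
        j0 :: (List.range n).map (fun (k : Nat) => (j0 + 1) + (k : Int)) := by
      rw [List.range_succ_eq_map, List.map_cons, List.map_map]
      refine congrArg₂ _ (by simp) (List.map_congr_left ?_)
      intro k _; simp [Function.comp]; ring
    rw [List.replicate_succ, pvRowsB_cons, hmap, ih]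
    rfl

theorem pvInnerA_prefix (rows : List (List String)) (j : Int) (new : String) :
    pvInnerA rows j new = (pvInnerA rows j "").map (fun t => new ++ t) := by
  induction rows generalizing new with
  | nil => simp [pvInnerA]
  | cons r rest ih =>
    simp only [pvInnerA]
    cases PySem.List.pyGet? r j with
    | none => simp
    | some c =>
      by_cases hc : c = ""
      · simp [hc]
      · simp only [ih (new ++ c), ih ("" ++ c)]
        simp [hc, Function.comp_def, String.append_assoc]

theorem pvColState_snd (rows : List (List String)) (j : Int) (acc : String) :
    (pvColState rows j (false, acc)).map Prod.snd = pvInnerA rows j acc := by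
  induction rows generalizing acc with
  | nil => simp [pvColState, pvInnerA]
  | cons r rs ih =>
    simp only [pvColState, pvInnerA, Bool.false_eq_true, if_false]
    cases PySem.List.pyGet? r j with
    | none => simp
    | some c =>
      by_cases hc : c = ""
      · simp [hc, pvColState_stopped]
      · simp [hc, ih]

theorem pvOuterA_eq_colsOf (arr : List (List String)) (js : List Nat) (new : String) :
    pvOuterA arr js new =
      (pvColsOf arr (js.map (fun (j : Nat) => (j : Int)))).map
        (fun st => new ++ pvJoinB (st.map (fun p => p.2 ++ " "))) := by
  induction js generalizing new with
  | nil => simp [pvOuterA, pvColsOf, pvJoinB]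
  | cons j js ih =>
    simp only [pvOuterA]
    have hsnd := pvColState_snd arr (j : Int) ""
    cases hcs : pvColState arr (j : Int) (false, "") with
    | none =>
      rw [hcs] at hsnd
      rw [pvInnerA_prefix, ← hsnd]
      simp [pvColsOf, hcs]
    | some s =>
      rw [hcs] at hsnd
      rw [pvInnerA_prefix, ← hsnd]
      simp only [Option.map_some]
      cases hrest : pvColsOf arr (js.map (fun (j : Nat) => (j : Int))) with
      | none => simp [ih, pvColsOf, hcs, hrest]
      | some ss => simp [ih, pvColsOf, hcs, hrest, pvJoinB, String.append_assoc]

-- ===== VERDICT (by name: the statement is the Claim_ definition above) =====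
theorem arr_adder_spec : Claim_equal_arr_adder := by
  intro arr _ _
  unfold Spec_arr_adder arr_adder arr_adder_alt
  cases PySem.List.pyGet? arr 0 with
  | none => rfl
  | some row0 =>
    show (pvOuterA arr (List.range row0.length) "").getD "" =
      ((pvRowsB 0 arr (List.replicate row0.length (false, ""))).map
        (fun st => pvJoinB (st.map (fun p => p.2 ++ " ")))).getD ""
    have hmap : (List.range row0.length).map (fun (k : Nat) => (0 : Int) + (k : Int)) =
        (List.range row0.length).map (fun (j : Nat) => (j : Int)) :=
      List.map_congr_left (fun k _ => by ring)
    rw [pvRowsB_replicate, hmap, pvOuterA_eq_colsOf]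
    cases pvColsOf arr ((List.range row0.length).map (fun (j : Nat) => (j : Int))) with
    | none => rfl
    | some ss => simp
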